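-- pv_equiv track=rewrite | github.com/jaisw07/convFlow | stt/whisper_stt.py | _merge_overlap
-- ===== SOURCE A (Python) =====
-- def _merge_overlap(prev_text, next_text):
--     prev_words = prev_text.split()
--     next_words = next_text.split()
--
--     max_overlap = min(len(prev_words), len(next_words), 30)
--
--     for i in range(max_overlap, 0, -1):
--         if prev_words[-i:] == next_words[:i]:
--             return " ".join(prev_words + next_words[i:])
--
--     return prev_text + " " + next_text
-- ===== SOURCE B (Python) =====
-- def _merge_overlap(prev_text, next_text):
--     pw = prev_text.split()
--     nw = next_text.split()
--     n = len(pw)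
--     cap = min(n, len(nw), 30)
--     # Candidate-pruning: keep the set of still-viable overlap lengths and sweep
--     # next_text's positions once, pruning every alignment that mismatches there.
--     cands = list(range(1, cap + 1))
--     for t in range(cap):
--         cands = [i for i in cands if i <= t or pw[n - i + t] == nw[t]]
--     k = max(cands, default=0)
--     if k:
--         return " ".join(pw + nw[k:])
--     return prev_text + " " + next_text
-- ===== Notes on version B (the rewrite author's own statement) =====
-- stated objective: alternative
-- what changed: Replaces A's per-length descending slice-equality scan (first hit wins) with a candidate-set pruning sweep: B keeps the list of still-viable overlap lengths and walks next_text's word positions once, filtering out every alignment that mismatches at that position, then takes the maximum survivor; no list slicing is used to test overlaps.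
import Mathlib
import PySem

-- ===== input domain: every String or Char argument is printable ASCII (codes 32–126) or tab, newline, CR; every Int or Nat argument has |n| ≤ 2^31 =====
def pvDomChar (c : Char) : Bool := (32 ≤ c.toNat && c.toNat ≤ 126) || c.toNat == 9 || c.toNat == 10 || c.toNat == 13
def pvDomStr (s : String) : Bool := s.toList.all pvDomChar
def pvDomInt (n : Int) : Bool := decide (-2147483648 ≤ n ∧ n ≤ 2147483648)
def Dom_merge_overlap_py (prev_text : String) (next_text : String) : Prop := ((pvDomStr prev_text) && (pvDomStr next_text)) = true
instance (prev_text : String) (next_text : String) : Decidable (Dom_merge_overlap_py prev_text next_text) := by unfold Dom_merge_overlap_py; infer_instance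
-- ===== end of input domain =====

-- B replaces A's descending per-length slice-equality scan with a candidate-set pruning
-- sweep over next_text's word positions, then takes the maximum surviving overlap length
-- (objective: alternative; same asymptotic cost).

-- ===== PORT A =====
-- the 'for i in range(max_overlap, 0, -1)' loop with early return: structural descent on i
def mergeA_loop (pw nw : List String) : Nat → Option Nat
  | 0 => none
  | i + 1 =>
      if PySem.List.slice pw (some (-((i + 1 : Nat) : Int))) none ==
         PySem.List.slice nw none (some ((i + 1 : Nat) : Int)) then
        some (i + 1)
      else
        mergeA_loop pw nw i

def merge_overlap_py (prev_text : String) (next_text : String) : String :=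
  let prev_words := PySem.Str.split₀ prev_text
  let next_words := PySem.Str.split₀ next_text
  let max_overlap := min (min prev_words.length next_words.length) 30
  match mergeA_loop prev_words next_words max_overlap with
  | some i => PySem.Str.join " " (prev_words ++ PySem.List.slice next_words (some (i : Int)) none)
  | none => prev_text ++ " " ++ next_text

-- ===== PORT B =====
-- the 'for t in range(cap): cands = [i for i in cands if i <= t or pw[n-i+t] == nw[t]]' sweep
def mergeB_cands (pw nw : List String) (n cap : Nat) : List Int :=
  (PySem.List.pyRange 0 (cap : Int) 1).foldl
    (fun cands t =>
      cands.filter (fun i =>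
        decide (i ≤ t) ||
          (PySem.List.pyGet? pw ((n : Int) - i + t) == PySem.List.pyGet? nw t)))
    (PySem.List.pyRange 1 ((cap : Int) + 1) 1)

def merge_overlap_py_alt (prev_text : String) (next_text : String) : String :=
  let pw := PySem.Str.split₀ prev_text
  let nw := PySem.Str.split₀ next_text
  let n := pw.length
  let cap := min (min n nw.length) 30
  let cands := mergeB_cands pw nw n cap
  let k : Int := match PySem.List.max? cands (fun x => x) with
    | some m => m
    | none => 0
  if k ≠ 0 then
    PySem.Str.join " " (pw ++ PySem.List.slice nw (some k) none)
  else
    prev_text ++ " " ++ next_text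

-- ===== PRECONDITION & SPEC =====
def Spec_merge_overlap_py (prev_text : String) (next_text : String) (out : String) : Prop := out = merge_overlap_py_alt prev_text next_text
instance (prev_text : String) (next_text : String) (out : String) : Decidable (Spec_merge_overlap_py prev_text next_text out) := by unfold Spec_merge_overlap_py; infer_instance

-- ===== CLAIM (what is proved, stated in full; the proofs are below) =====
def Claim_equal_merge_overlap_py : Prop := ∀ (prev_text : String) (next_text : String), Dom_merge_overlap_py prev_text next_text → Spec_merge_overlap_py prev_text next_text (merge_overlap_py prev_text next_text)

-- ===== LEMMAS AND PROOFS =====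

-- the cumulative survival predicate after sweeping positions 0..T-1
def fullPred (pw nw : List String) (n T : Nat) (i : Int) : Bool :=
  (PySem.List.pyRange 0 (T : Int) 1).all (fun t =>
    decide (i ≤ t) ||
      (PySem.List.pyGet? pw ((n : Int) - i + t) == PySem.List.pyGet? nw t))

-- A's per-length test, as a Bool
def sliceTest (pw nw : List String) (i : Int) : Bool :=
  PySem.List.slice pw (some (-i)) none == PySem.List.slice nw none (some i)

-- one pruning step extends the cumulative predicate by one position
theorem fullPred_succ (pw nw : List String) (n T : Nat) (i : Int) :
    fullPred pw nw n (T + 1) i =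
      (fullPred pw nw n T i &&
        (decide (i ≤ (T : Int)) ||
          (PySem.List.pyGet? pw ((n : Int) - i + T) == PySem.List.pyGet? nw T))) := by
  unfold fullPred
  rw [show ((T + 1 : Nat) : Int) = (T : Int) + 1 by push_cast; ring,
    PySem.List.pyRange_one_succ_right (by omega), List.all_append]
  simp

-- B's sweep over any starting candidate list is a filter by the cumulative predicate
theorem foldl_prune (pw nw : List String) (n T : Nat) (l : List Int) :
    (PySem.List.pyRange 0 (T : Int) 1).foldl
      (fun cands t =>
        cands.filter (fun i =>
          decide (i ≤ t) ||
            (PySem.List.pyGet? pw ((n : Int) - i + t) == PySem.List.pyGet? nw t)))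
      l = l.filter (fullPred pw nw n T) := by
  induction T with
  | zero =>
      rw [PySem.List.pyRange_one_eq_nil (by omega)]
      simp only [List.foldl_nil]
      symm
      apply List.filter_eq_self.mpr
      intro a _
      unfold fullPred
      rw [PySem.List.pyRange_one_eq_nil (by omega)]
      simp
  | succ T ih =>
      rw [show ((T + 1 : Nat) : Int) = (T : Int) + 1 by push_cast; ring,
        PySem.List.pyRange_one_succ_right (by omega), List.foldl_append]
      simp only [List.foldl_cons, List.foldl_nil]
      rw [ih, List.filter_filter]
      apply List.filter_congr
      intro i _
      rw [fullPred_succ, Bool.and_comm]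

theorem cands_eq_filter (pw nw : List String) (n cap : Nat) :
    mergeB_cands pw nw n cap =
      (PySem.List.pyRange 1 ((cap : Int) + 1) 1).filter (fullPred pw nw n cap) := by
  unfold mergeB_cands
  exact foldl_prune pw nw n cap _

-- for 1 ≤ i ≤ cap ≤ min(|pw|,|nw|), the cumulative predicate is A's slice equality
theorem fullPred_eq_sliceTest (pw nw : List String) (n cap : Nat) (i : Int)
    (hn : n = pw.length) (h1 : 1 ≤ i) (h2 : i ≤ (cap : Int))
    (hc1 : cap ≤ pw.length) (hc2 : cap ≤ nw.length) :
    fullPred pw nw n cap i = sliceTest pw nw i := by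
  obtain ⟨j, rfl⟩ : ∃ j : Nat, i = (j : Int) := ⟨i.toNat, by omega⟩
  have hj1 : 1 ≤ j := by omega
  have hj2 : j ≤ cap := by omega
  have hjp : j ≤ pw.length := le_trans hj2 hc1
  have hjn : j ≤ nw.length := le_trans hj2 hc2
  unfold sliceTest
  rw [PySem.List.slice_from_neg_natCast pw j (by omega), PySem.List.slice_to_natCast]
  have hLd : (pw.drop (pw.length - j)).length = j := by simp [List.length_drop]; omega
  have hLt : (nw.take j).length = j := by simp [List.length_take]; omega
  by_cases heq : pw.drop (pw.length - j) = nw.take j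
  · rw [heq]
    simp only [beq_self_eq_true]
    unfold fullPred
    rw [List.all_eq_true]
    intro t ht
    obtain ⟨ht0, ht1⟩ := PySem.List.mem_pyRange_one.mp ht
    obtain ⟨u, rfl⟩ : ∃ u : Nat, t = (u : Int) := ⟨t.toNat, by omega⟩
    by_cases hg : (j : Int) ≤ (u : Int)
    · simp [hg]
    · have huj : u < j := by omega
      have hidx : (n : Int) - (j : Int) + (u : Int) =
          ((pw.length - j + u : Nat) : Int) := by omega
      have hlt : pw.length - j + u < pw.length := by omega
      have hlt2 : u < nw.length := by omega
      have hget : pw[pw.length - j + u]'hlt = nw[u]'hlt2 := by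
        have h1' := congrArg (fun l => l[u]?) heq
        simp only [List.getElem?_drop, List.getElem?_take] at h1'
        simp only [huj, if_pos] at h1'
        rw [List.getElem?_eq_getElem (by omega), List.getElem?_eq_getElem (by omega)] at h1'
        · simpa using h1'
      rw [hidx]
      simp only [PySem.List.pyGet?_natCast]
      rw [List.getElem?_eq_getElem hlt, List.getElem?_eq_getElem hlt2, hget]
      simp
  · have : (pw.drop (pw.length - j) == nw.take j) = false := by
      simpa using heq
    rw [this]
    unfold fullPred
    rw [Bool.eq_false_iff]
    intro hall
    apply heq
    rw [List.all_eq_true] at hall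
    apply List.ext_getElem (by omega)
    intro k hk1 hk2
    have hkj : k < j := by omega
    have hkc : (k : Int) < (cap : Int) := by omega
    have hmem : ((k : Nat) : Int) ∈ PySem.List.pyRange 0 (cap : Int) 1 :=
      PySem.List.mem_pyRange_one.mpr ⟨by omega, hkc⟩
    have := hall _ hmem
    have hng : ¬ ((j : Int) ≤ ((k : Nat) : Int)) := by omega
    simp only [hng, decide_false, Bool.false_or, beq_iff_eq] at this
    have hidx : (n : Int) - (j : Int) + ((k : Nat) : Int) =
        ((pw.length - j + k : Nat) : Int) := by omega
    rw [hidx] at this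
    simp only [PySem.List.pyGet?_natCast] at this
    have hlt : pw.length - j + k < pw.length := by omega
    have hlt2 : k < nw.length := by omega
    rw [List.getElem?_eq_getElem hlt, List.getElem?_eq_getElem hlt2] at this
    simp only [Option.some.injEq] at this
    rw [List.getElem_drop, List.getElem_take]
    convert this using 2

-- max of a list with a strict top appended
theorem max?_append_top (l : List Int) (x : Int) (h : ∀ y ∈ l, y < x) :
    PySem.List.max? (l ++ [x]) (fun y => y) = some x := by
  cases hm : PySem.List.max? (l ++ [x]) (fun y => y) with
  | none =>
      rw [PySem.List.max?_eq_none_iff] at hm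
      simp at hm
  | some m =>
      have hmem := PySem.List.max?_mem hm
      have hmax := PySem.List.max?_isMax hm x (by simp)
      rcases List.mem_append.mp hmem with hl | hr
      · exact absurd hmax (by have := h m hl; omega)
      · simp only [List.mem_singleton] at hr
        rw [hr]

-- the maximum surviving candidate equals A's descending first-hit scan
theorem max_filter_eq_loop (pw nw : List String) (c : Nat) :
    (match PySem.List.max? ((PySem.List.pyRange 1 ((c : Int) + 1) 1).filter
        (sliceTest pw nw)) (fun y => y) with
      | some m => m
      | none => (0 : Int)) =
    (match mergeA_loop pw nw c with
      | some i => (i : Int)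
      | none => 0) := by
  induction c with
  | zero =>
      rw [PySem.List.pyRange_one_eq_nil (by omega)]
      simp [mergeA_loop, PySem.List.max?]
  | succ c ih =>
      rw [show ((c + 1 : Nat) : Int) + 1 = ((c : Int) + 1) + 1 by push_cast; ring,
        PySem.List.pyRange_one_succ_right (by omega), List.filter_append]
      have hcast : ((c : Int) + 1) = ((c + 1 : Nat) : Int) := by push_cast; ring
      simp only [List.filter_cons, List.filter_nil]
      by_cases hb : sliceTest pw nw ((c : Int) + 1) = true
      · rw [hb]
        simp only [if_true]
        rw [max?_append_top _ _ (by
          intro y hy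
          have := PySem.List.mem_pyRange_one.mp (List.mem_of_mem_filter hy)
          omega)]
        have hA : mergeA_loop pw nw (c + 1) = some (c + 1) := by
          unfold sliceTest at hb
          rw [hcast] at hb
          simp only [mergeA_loop, hb, if_true]
        rw [hA]
        simp only [hcast]
      · rw [Bool.not_eq_true] at hb
        rw [hb]
        simp only [Bool.false_eq_true, if_false, List.append_nil]
        have hA : mergeA_loop pw nw (c + 1) = mergeA_loop pw nw c := by
          unfold sliceTest at hb
          rw [hcast] at hb
          simp only [mergeA_loop, hb]
          simp
        rw [hA]
        exact ih

theorem mergeA_loop_some (pw nw : List String) (c i : Nat)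
    (h : mergeA_loop pw nw c = some i) : 1 ≤ i ∧ i ≤ c := by
  induction c with
  | zero => simp [mergeA_loop] at h
  | succ c ih =>
      simp only [mergeA_loop] at h
      split at h
      · cases h; omega
      · have := ih h; omega

-- ===== VERDICT (by name: the statement is the Claim_ definition above) =====
theorem merge_overlap_py_spec : Claim_equal_merge_overlap_py := by
  intro prev_text next_text _
  unfold Spec_merge_overlap_py merge_overlap_py merge_overlap_py_alt
  set pw := PySem.Str.split₀ prev_text with hpw
  set nw := PySem.Str.split₀ next_text with hnw
  set cap := min (min pw.length nw.length) 30 with hcap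
  simp only
  have hcands : mergeB_cands pw nw pw.length cap =
      (PySem.List.pyRange 1 ((cap : Int) + 1) 1).filter (sliceTest pw nw) := by
    rw [cands_eq_filter]
    apply List.filter_congr
    intro i hi
    obtain ⟨hi1, hi2⟩ := PySem.List.mem_pyRange_one.mp hi
    exact fullPred_eq_sliceTest pw nw pw.length cap i rfl hi1 (by omega)
      (by omega) (by omega)
  rw [hcands]
  have hk := max_filter_eq_loop pw nw cap
  cases hml : mergeA_loop pw nw cap with
  | none =>
      rw [hml] at hk
      simp only at hk
      rw [hk]
      simp
  | some i =>
      rw [hml] at hk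
      simp only at hk
      rw [hk]
      have hi := mergeA_loop_some pw nw _ _ hml
      rw [if_pos (by simp; omega)]
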